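-- pv_equiv track=rewrite | github.com/inkstitch/inkstitch | lib/stitches/ripple_stitch.py | _repeat_coords
-- ===== SOURCE A (Python) =====
-- def _repeat_coords(coords, repeats):
--     if not coords:
--         return coords
--     final_coords = []
--     for i in range(repeats):
--         if i % 2 == 1:
--             # reverse every other pass
--             this_coords = coords[::-1]
--         else:
--             this_coords = coords[:]
--
--         final_coords.extend(this_coords)
--     return final_coords
-- ===== SOURCE B (Python) =====
-- def _repeat_coords(coords, repeats):
--     if not coords:
--         return coords
--     forward = list(coords)
--     backward = coords[::-1]
--     result = (forward + backward) * (max(repeats, 0) // 2)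
--     if repeats > 0 and repeats % 2 == 1:
--         result += forward
--     return result
-- ===== Notes on version B (the rewrite author's own statement) =====
-- stated objective: alternative
-- what changed: Replaces the per-pass loop (extending forward or reversed on each iteration) with a period-2 decomposition: one forward+backward block replicated repeats//2 times by list multiplication, plus a trailing forward copy when repeats is positive and odd.
import Mathlib
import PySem

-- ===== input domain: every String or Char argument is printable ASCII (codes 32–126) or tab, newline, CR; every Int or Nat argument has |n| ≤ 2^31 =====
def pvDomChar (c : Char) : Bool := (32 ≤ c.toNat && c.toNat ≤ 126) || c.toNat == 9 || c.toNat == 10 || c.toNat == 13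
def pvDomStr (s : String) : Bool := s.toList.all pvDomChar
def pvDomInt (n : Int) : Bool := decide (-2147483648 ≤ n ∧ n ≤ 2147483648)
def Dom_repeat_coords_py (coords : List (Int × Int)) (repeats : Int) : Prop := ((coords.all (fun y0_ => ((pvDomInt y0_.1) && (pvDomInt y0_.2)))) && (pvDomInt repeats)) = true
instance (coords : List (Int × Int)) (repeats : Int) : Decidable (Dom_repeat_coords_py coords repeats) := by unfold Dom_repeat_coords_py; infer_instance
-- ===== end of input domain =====

-- B replaces A's per-pass loop by a period-2 decomposition: a forward++backward block
-- replicated repeats//2 times, plus a trailing forward copy when repeats is positive and odd.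

-- ===== PORT A =====
-- for i in range(repeats): extend with coords[::-1] on odd i (coords[::-1] is exactly List.reverse), coords[:] otherwise
def repeat_coords_py (coords : List (Int × Int)) (repeats : Int) : List (Int × Int) :=
  if coords = [] then coords
  else (PySem.List.pyRange 0 repeats 1).foldl
    (fun final_coords i =>
      final_coords ++ (if PySem.Int.mod i 2 = 1 then coords.reverse else coords)) []

-- ===== PORT B =====
def repeat_coords_py_alt (coords : List (Int × Int)) (repeats : Int) : List (Int × Int) :=
  if coords = [] then coords
  else
    let forward := coords
    let backward := coords.reverse
    let result := (List.replicate (PySem.Int.floordiv (max repeats 0) 2).toNat (forward ++ backward)).flatten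
    if repeats > 0 ∧ PySem.Int.mod repeats 2 = 1 then result ++ forward else result

-- ===== PRECONDITION & SPEC =====
def Spec_repeat_coords_py (coords : List (Int × Int)) (repeats : Int) (out : List (Int × Int)) : Prop := out = repeat_coords_py_alt coords repeats
instance (coords : List (Int × Int)) (repeats : Int) (out : List (Int × Int)) : Decidable (Spec_repeat_coords_py coords repeats out) := by unfold Spec_repeat_coords_py; infer_instance

-- ===== CLAIM (what is proved, stated in full; the proofs are below) =====
def Claim_equal_repeat_coords_py : Prop := ∀ (coords : List (Int × Int)) (repeats : Int), Dom_repeat_coords_py coords repeats → Spec_repeat_coords_py coords repeats (repeat_coords_py coords repeats)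

-- ===== LEMMAS AND PROOFS =====

-- A's fold over range(n) equals the period-2 pattern, by induction on n
theorem pv_fold_pattern (coords : List (Int × Int)) (n : Nat) :
    (PySem.List.pyRange 0 (n : Int) 1).foldl
      (fun acc i => acc ++ (if PySem.Int.mod i 2 = 1 then coords.reverse else coords)) []
    = (List.replicate (n / 2) (coords ++ coords.reverse)).flatten
        ++ (if n % 2 = 1 then coords else []) := by
  induction n with
  | zero => simp [PySem.List.pyRange_one_eq_nil]
  | succ n ih =>
    rw [show ((n + 1 : Nat) : Int) = (n : Int) + 1 by push_cast; ring,
        PySem.List.pyRange_one_succ_right (by positivity), List.foldl_append, ih]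
    have hmod : PySem.Int.mod (n : Int) 2 = ((n % 2 : Nat) : Int) :=
      PySem.Int.mod_natCast n 2
    simp only [List.foldl_cons, List.foldl_nil, hmod]
    rcases Nat.even_or_odd n with he | ho
    · have h2 : n % 2 = 0 := Nat.even_iff.mp he
      have h3 : (n + 1) % 2 = 1 := by omega
      have h4 : (n + 1) / 2 = n / 2 := by omega
      simp [h2, h3, h4]
    · have h2 : n % 2 = 1 := Nat.odd_iff.mp ho
      have h3 : (n + 1) % 2 = 0 := by omega
      have h4 : (n + 1) / 2 = n / 2 + 1 := by omega
      simp only [h2, h3, h4]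
      norm_num
      rw [List.replicate_succ', List.flatten_append]
      simp

-- ===== VERDICT (by name: the statement is the Claim_ definition above) =====
theorem repeat_coords_py_spec : Claim_equal_repeat_coords_py := by
  intro coords repeats _
  unfold Spec_repeat_coords_py repeat_coords_py repeat_coords_py_alt
  by_cases hc : coords = []
  · simp [hc]
  · simp only [hc, if_false]
    by_cases hr : repeats ≤ 0
    · rw [PySem.List.pyRange_one_eq_nil (by omega)]
      have hmax : max repeats 0 = 0 := by omega
      have : ¬ (repeats > 0 ∧ PySem.Int.mod repeats 2 = 1) := by
        rintro ⟨h1, _⟩; omega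
      simp [hmax, PySem.Int.floordiv]
      intro h1
      omega
    · replace hr : (0:Int) < repeats := by omega
      obtain ⟨n, rfl⟩ : ∃ n : Nat, repeats = (n : Int) := ⟨repeats.toNat, by omega⟩
      have hmax : max ((n : Nat) : Int) 0 = ((n : Nat) : Int) := by omega
      rw [pv_fold_pattern]
      have hmod : PySem.Int.mod ((n : Nat) : Int) 2 = ((n % 2 : Nat) : Int) :=
        PySem.Int.mod_natCast _ 2
      have hdiv : PySem.Int.floordiv ((n : Nat) : Int) 2 = ((n / 2 : Nat) : Int) :=
        PySem.Int.floordiv_natCast _ 2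
      have ht : (((n : Nat) : Int) / 2).toNat = n / 2 := by omega
      simp only [hmax, hmod, hdiv]
      rcases Nat.even_or_odd n with he | ho
      · have h2 : n % 2 = 0 := Nat.even_iff.mp he
        have h3 : ¬ (((n % 2 : Nat) : Int) = 1) := by omega
        simp [h2, ht]
      · have h2 : n % 2 = 1 := Nat.odd_iff.mp ho
        have hpos : ((n : Nat) : Int) > 0 := by omega
        have hn0 : 0 < n := by omega
        simp [h2, hn0, ht]
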